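-- pv_equiv track=rewrite | github.com/vaishali59/CrackingTheCodingInterview | OneAway.py | checkEdit
-- ===== SOURCE A (Python) =====
-- def checkEdit(values):
--     edit=False
--     for count in values:
--         if count>1:
--             return False
--         if count==1:
--             if edit:
--                 return False
--             edit=True
--     return True
-- ===== SOURCE B (Python) =====
-- def checkEdit(values):
--     # Order-statistic approach: only the two largest elements matter.
--     # Valid iff the largest is <= 1 and the second largest (if any) is <= 0
--     # (two elements >= 1 would mean two edits; any element > 1 is too many).
--     top = sorted(values, reverse=True)[:2]
--     if not top:
--         return True
--     if top[0] > 1: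
--         return False
--     return len(top) < 2 or top[1] < 1
-- ===== Notes on version B (the rewrite author's own statement) =====
-- stated objective: alternative
-- what changed: Replaces A's early-exit loop threading an 'edit' boolean with an order-statistic test: sort descending, keep the top two, and decide from the largest (must be <= 1) and second largest (must be < 1) alone.
import Mathlib
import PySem

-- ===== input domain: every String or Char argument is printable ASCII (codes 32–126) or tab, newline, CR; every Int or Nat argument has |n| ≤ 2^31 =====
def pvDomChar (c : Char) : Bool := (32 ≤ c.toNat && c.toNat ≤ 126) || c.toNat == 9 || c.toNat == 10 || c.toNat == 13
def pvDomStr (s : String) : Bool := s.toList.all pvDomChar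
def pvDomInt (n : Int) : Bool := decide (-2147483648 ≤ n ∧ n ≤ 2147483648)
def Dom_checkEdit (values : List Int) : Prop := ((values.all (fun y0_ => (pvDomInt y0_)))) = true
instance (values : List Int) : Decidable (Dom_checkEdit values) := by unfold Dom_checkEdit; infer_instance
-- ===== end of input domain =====

-- B replaces A's early-exit loop threading an 'edit' flag by an order-statistic test on the two
-- largest elements (sort descending, take 2); objective: alternative.

-- ===== PORT A =====
-- the for-loop of A, threading the 'edit' boolean; early returns become result values
def checkEditLoop (values : List Int) (edit : Bool) : Bool :=
  match values with
  | [] => true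
  | count :: rest =>
    if count > 1 then false
    else if count = 1 then
      if edit then false else checkEditLoop rest true
    else checkEditLoop rest edit

def checkEdit (values : List Int) : Bool := checkEditLoop values false

-- ===== PORT B =====
def checkEdit_alt (values : List Int) : Bool :=
  let top := PySem.List.slice (PySem.List.sorted values (fun x => x) true) none (some 2)
  match top with
  | [] => true
  | t0 :: rest =>
    if t0 > 1 then false
    else
      match rest with
      | [] => true
      | t1 :: _ => decide (t1 < 1)

-- ===== PRECONDITION & SPEC =====
def Spec_checkEdit (values : List Int) (out : Bool) : Prop := out = checkEdit_alt values
instance (values : List Int) (out : Bool) : Decidable (Spec_checkEdit values out) := by unfold Spec_checkEdit; infer_instance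

-- ===== CLAIM (what is proved, stated in full; the proofs are below) =====
def Claim_equal_checkEdit : Prop := ∀ (values : List Int), Dom_checkEdit values → Spec_checkEdit values (checkEdit values)

-- ===== LEMMAS AND PROOFS =====
-- loop invariant: A's loop equals "no element > 1 and (#ones + pending edit) <= 1"
theorem checkEditLoop_eq (values : List Int) (edit : Bool) :
    checkEditLoop values edit =
      (decide (∀ x ∈ values, x ≤ 1) &&
        decide (values.countP (fun count => count == 1) + (if edit then 1 else 0) ≤ 1)) := by
  induction values generalizing edit with
  | nil => cases edit <;> simp [checkEditLoop]
  | cons c rest ih =>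
    simp only [checkEditLoop, List.countP_cons]
    by_cases h1 : c > 1
    · simp [h1]
    · by_cases h2 : c = 1
      · cases edit with
        | false => simp [h2, ih]
        | true => simp [h2]
      · have hc : c ≤ 1 := by omega
        simp [h2, ih, hc]

-- on a descending list, "all ≤ 1 and at most one 1" is read off the first two elements
theorem desc_head2 (s : List Int) (hpair : s.Pairwise (fun a b => b ≤ a)) :
    ((match s.take 2 with
      | [] => true
      | t0 :: rest =>
        if t0 > 1 then false
        else
          match rest with
          | [] => true
          | t1 :: _ => decide (t1 < 1)) : Bool)
      = (decide (∀ x ∈ s, x ≤ 1) &&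
          decide (s.countP (fun count => count == 1) + 0 ≤ 1)) := by
  match s, hpair with
  | [], _ => simp
  | [t0], _ =>
    by_cases h1 : t0 > 1
    · simp [h1]
    · by_cases e0 : t0 = 1 <;> simp [h1, e0] <;> omega
  | t0 :: t1 :: rest, hpair =>
    rw [List.pairwise_cons] at hpair
    obtain ⟨ht0, hpair'⟩ := hpair
    rw [List.pairwise_cons] at hpair'
    obtain ⟨ht1, _⟩ := hpair'
    have ht10 : t1 ≤ t0 := ht0 t1 (by simp)
    simp only [List.take, List.countP_cons]
    by_cases h1 : t0 > 1
    · simp [h1]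
    · by_cases h2 : t1 < 1
      · have hrest : ∀ x ∈ rest, ¬ (x == 1) = true := by
          intro x hx
          have := ht1 x hx
          simp
          omega
        have hcrest : rest.countP (fun count => count == 1) = 0 :=
          List.countP_eq_zero.mpr hrest
        simp [h1, h2, hcrest]
        constructor
        · refine ⟨by omega, by omega, ?_⟩
          intro a ha
          have := ht1 a ha
          omega
        · by_cases e0 : t0 = 1 <;> by_cases e1 : t1 = 1 <;> simp [e0, e1] <;> omega
      · have e1 : t1 = 1 := by omega
        have e0 : t0 = 1 := by omega
        simp [e0, e1]

-- ===== VERDICT (by name: the statement is the Claim_ definition above) =====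
theorem checkEdit_spec : Claim_equal_checkEdit := by
  intro values _
  unfold Spec_checkEdit checkEdit checkEdit_alt
  rw [checkEditLoop_eq]
  have hperm : (PySem.List.sorted values (fun x => x) true).Perm values :=
    PySem.List.sorted_perm values (fun x => x) true
  have hpair : (PySem.List.sorted values (fun x => x) true).Pairwise (fun a b => b ≤ a) :=
    PySem.List.sorted_pairwise_rev values (fun x => x)
  have hall : decide (∀ x ∈ values, x ≤ 1)
      = decide (∀ x ∈ PySem.List.sorted values (fun x => x) true, x ≤ 1) := by
    apply decide_eq_decide.mpr
    constructor <;> intro h x hx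
    · exact h x (hperm.mem_iff.mp hx)
    · exact h x (hperm.mem_iff.mpr hx)
  have hcount : values.countP (fun count => count == 1)
      = (PySem.List.sorted values (fun x => x) true).countP (fun count => count == 1) :=
    (hperm.countP_eq _).symm
  rw [hall, hcount,
    show PySem.List.slice (PySem.List.sorted values (fun x => x) true) none (some 2)
        = (PySem.List.sorted values (fun x => x) true).take 2 from
      PySem.List.slice_to_natCast _ 2]
  exact (desc_head2 _ hpair).symm
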